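-- pv_equiv track=rewrite | github.com/GinShio/scripts | builder/src/cli.py | _parse_extra_switches
-- ===== SOURCE A (Python) =====
-- from typing import Iterable, List
--
-- def _parse_extra_switches(values: Iterable[str]) -> tuple[List[str], List[str], List[str]]:
--     config_args: List[str] = []
--     build_args: List[str] = []
--     install_args: List[str] = []
--
--     for raw in values:
--         if raw is None:
--             continue
--         text = raw.strip()
--         if not text:
--             continue
--
--         scope: str | None = None
--         payload = text
--
--         if "," in text:
--             prefix, _, remainder = text.partition(",")
--             candidate = prefix.strip().lower()
--             if candidate in {"config", "build", "install"} and remainder: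
--                 scope = candidate
--                 payload = remainder
--             else:
--                 payload = text
--
--         parts = [part.strip() for part in payload.split(",") if part.strip()]
--         if not parts:
--             continue
--
--         targets: List[List[str]]
--         if scope == "config":
--             targets = [config_args]
--         elif scope == "build":
--             targets = [build_args]
--         elif scope == "install":
--             targets = [install_args]
--         else:
--             targets = [config_args, build_args, install_args]
--
--         for part in parts:
--             for target in targets:
--                 target.append(part)
--
--     return config_args, build_args, install_args
-- ===== SOURCE B (Python) =====
-- from typing import Iterable, List
--
-- def _parse_extra_switches(values: Iterable[str]) -> tuple[List[str], List[str], List[str]]: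
--     # Pass 1: parse each value once into (scope, parts) using a single split(",").
--     scoped: List[tuple] = []
--     for raw in values:
--         if raw is None:
--             continue
--         tokens = raw.strip().split(",")
--         scope = None
--         if len(tokens) > 1:
--             head = tokens[0].strip().lower()
--             if head in ("config", "build", "install") and (len(tokens) > 2 or tokens[1] != ""):
--                 scope = head
--                 tokens = tokens[1:]
--         parts = [t.strip() for t in tokens if t.strip()]
--         if parts:
--             scoped.append((scope, parts))
--     # Pass 2: distribute into the three lists, preserving encounter order.
--     config_args = [p for s, ps in scoped if s is None or s == "config" for p in ps]
--     build_args = [p for s, ps in scoped if s is None or s == "build" for p in ps]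
--     install_args = [p for s, ps in scoped if s is None or s == "install" for p in ps]
--     return config_args, build_args, install_args
-- ===== Notes on version B (the rewrite author's own statement) =====
-- stated objective: alternative
-- what changed: B parses each value with a single split(",") (inspecting the first token and token count instead of A's partition + membership-set + re-split of the payload) and decomposes the work into a parse pass producing an intermediate (scope, parts) list followed by three distribution comprehensions, instead of A's single loop mutating three lists through an aliased targets list.
import Mathlib
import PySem

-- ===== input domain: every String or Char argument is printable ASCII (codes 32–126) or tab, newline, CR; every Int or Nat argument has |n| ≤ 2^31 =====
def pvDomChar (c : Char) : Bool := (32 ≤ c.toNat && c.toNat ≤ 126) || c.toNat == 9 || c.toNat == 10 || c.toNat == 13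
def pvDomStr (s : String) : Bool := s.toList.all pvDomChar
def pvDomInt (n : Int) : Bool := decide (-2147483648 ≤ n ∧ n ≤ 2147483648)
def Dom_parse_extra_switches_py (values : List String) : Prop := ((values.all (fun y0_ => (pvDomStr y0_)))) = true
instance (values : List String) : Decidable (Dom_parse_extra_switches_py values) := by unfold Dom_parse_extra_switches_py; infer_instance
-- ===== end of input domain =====

-- B replaces A's partition-then-resplit parsing by one split(",") per value and a
-- parse-then-distribute decomposition (intermediate (scope, parts) list, then three
-- comprehensions); same return value, objective: alternative structure.

-- ===== PORT A =====
-- the set literal {"config", "build", "install"} (used for membership only)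
def pvScopes : List (List Char) := [['c','o','n','f','i','g'], ['b','u','i','l','d'], ['i','n','s','t','a','l','l']]

-- one iteration of A's `for raw in values` loop over the state (config_args, build_args, install_args);
-- `if raw is None: continue` cannot fire (values is a list of strings)
def pvStepA (st : List String × List String × List String) (raw : String) :
    List String × List String × List String :=
  let text := PySem.Chars.strip raw.toList
  if text = [] then st
  else
    -- `prefix, _, remainder = text.partition(",")` ported by hand (PySem has no partition):
    -- for the single-character separator "," the prefix is the run before the first ',' and the
    -- remainder is everything after it — exact (the branch only runs when "," occurs in text)
    let sp : Option (List Char) × List Char :=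
      if PySem.Chars.isIn [','] text then
        let pre := text.takeWhile (· ≠ ',')
        let remainder := (text.dropWhile (· ≠ ',')).drop 1
        let candidate := PySem.Chars.lower (PySem.Chars.strip pre)
        if candidate ∈ pvScopes ∧ remainder ≠ [] then (some candidate, remainder)
        else (none, text)
      else (none, text)
    -- parts = [part.strip() for part in payload.split(",") if part.strip()]
    let parts := ((PySem.Chars.splitOn sp.2 [',']).map PySem.Chars.strip).filter (fun p => p ≠ [])
    if parts = [] then st
    else
      let ps := parts.map String.ofList
      -- the targets selection + `for part in parts: for target in targets: target.append(part)`
      -- (appending every part to each selected list, in order)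
      if sp.1 = some (['c','o','n','f','i','g']) then (st.1 ++ ps, st.2.1, st.2.2)
      else if sp.1 = some (['b','u','i','l','d']) then (st.1, st.2.1 ++ ps, st.2.2)
      else if sp.1 = some (['i','n','s','t','a','l','l']) then (st.1, st.2.1, st.2.2 ++ ps)
      else (st.1 ++ ps, st.2.1 ++ ps, st.2.2 ++ ps)

def parse_extra_switches_py (values : List String) : List String × List String × List String :=
  values.foldl pvStepA ([], [], [])

-- ===== PORT B =====
-- Source B's loop body: one split(",") per value, giving (scope, parts);
-- `if raw is None: continue` cannot fire (values is a list of strings)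
def pvParseOne (raw : String) : Option (List Char) × List String :=
  let tokens := PySem.Chars.splitOn (PySem.Chars.strip raw.toList) [',']
  let st : Option (List Char) × List (List Char) :=
    if 1 < tokens.length then
      -- tokens[0] (split never returns an empty list) and tokens[1] (guarded by len > 1)
      let head := PySem.Chars.lower (PySem.Chars.strip (tokens.headD []))
      if head ∈ [['c','o','n','f','i','g'], ['b','u','i','l','d'], ['i','n','s','t','a','l','l']] ∧ (2 < tokens.length ∨ tokens.getD 1 [] ≠ []) then
        (some head, tokens.drop 1)  -- tokens = tokens[1:]
      else (none, tokens)
    else (none, tokens)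
  -- parts = [t.strip() for t in tokens if t.strip()]
  (st.1, ((st.2.map PySem.Chars.strip).filter (fun p => p ≠ [])).map String.ofList)

def parse_extra_switches_py_alt (values : List String) : List String × List String × List String :=
  -- pass 1: scoped = the (scope, parts) entries with non-empty parts
  let entries := values.foldl (fun acc raw =>
    let e := pvParseOne raw
    if e.2 ≠ [] then acc ++ [e] else acc) []
  -- pass 2: three comprehensions distributing the parts
  ((entries.filter (fun e => e.1 = none ∨ e.1 = some (['c','o','n','f','i','g']))).flatMap (fun e => e.2),
   (entries.filter (fun e => e.1 = none ∨ e.1 = some (['b','u','i','l','d']))).flatMap (fun e => e.2),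
   (entries.filter (fun e => e.1 = none ∨ e.1 = some (['i','n','s','t','a','l','l']))).flatMap (fun e => e.2))

-- ===== PRECONDITION & SPEC =====
def Spec_parse_extra_switches_py (values : List String) (out : List String × List String × List String) : Prop := out = parse_extra_switches_py_alt values
instance (values : List String) (out : List String × List String × List String) : Decidable (Spec_parse_extra_switches_py values out) := by unfold Spec_parse_extra_switches_py; infer_instance

-- ===== CLAIM (what is proved, stated in full; the proofs are below) =====
def Claim_equal_parse_extra_switches_py : Prop := ∀ (values : List String), Dom_parse_extra_switches_py values → Spec_parse_extra_switches_py values (parse_extra_switches_py values)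

-- ===== LEMMAS AND PROOFS =====

theorem pv_mh_congr {α : Type} (f g : α → α) (h : ∀ t, f t = g t) (l : List α) :
    List.modifyHead f l = List.modifyHead g l := by cases l <;> simp [h]

theorem pv_mh_eta {α : Type} (l : List α) : List.modifyHead (fun t => t) l = l := by
  cases l <;> rfl

-- PySem.Chars.splitOn with the one-character separator "," is List.splitOnP (· == ',')
theorem pv_go_comma : ∀ (fuel : Nat) (l cur : List Char) (acc : List (List Char)), l.length < fuel →
    PySem.Chars.splitOn.go [','] fuel l cur acc
      = acc.reverse ++ List.modifyHead (fun t => cur.reverse ++ t) (List.splitOnP (· == ',') l) := by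
  intro fuel
  induction fuel with
  | zero => intro l cur acc h; omega
  | succ f ih =>
    intro l cur acc h
    cases l with
    | nil => rw [PySem.Chars.splitOn.go.eq_def]; simp [List.splitOnP_nil]
    | cons ch rest =>
      rw [PySem.Chars.splitOn.go.eq_def]
      by_cases hc : ch = ','
      · subst hc
        simp only [List.isPrefixOf, BEq.rfl, Bool.and_self, if_pos]
        rw [ih _ _ _ (by simpa using Nat.lt_of_succ_lt_succ h)]
        simp [List.splitOnP_cons, pv_mh_eta]
      · have hp : List.isPrefixOf [','] (ch :: rest) = false := by
          simp [List.isPrefixOf]; exact fun h' => hc h'.symm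
        simp only [hp, Bool.false_eq_true, if_false]
        rw [ih _ _ _ (by simpa using Nat.lt_of_succ_lt_succ h)]
        simp only [List.splitOnP_cons, hc, beq_iff_eq, if_false, List.modifyHead_modifyHead]
        congr 1
        apply pv_mh_congr
        intro t; simp

theorem pv_splitOn_comma (cs : List Char) :
    PySem.Chars.splitOn cs [','] = List.splitOnP (· == ',') cs := by
  rw [PySem.Chars.splitOn]
  rw [pv_go_comma _ _ _ _ (by omega)]
  simp [pv_mh_eta]

theorem pv_sp_not_mem (cs : List Char) (h : ',' ∉ cs) :
    List.splitOnP (· == ',') cs = [cs] := by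
  induction cs with
  | nil => simp [List.splitOnP_nil]
  | cons a t ih =>
    have ha : a ≠ ',' := fun e => h (e ▸ List.mem_cons_self)
    have ht : ',' ∉ t := fun m => h (List.mem_cons_of_mem _ m)
    simp [List.splitOnP_cons, ha, ih ht]

theorem pv_sp_mem (cs : List Char) (h : ',' ∈ cs) :
    List.splitOnP (· == ',') cs
      = cs.takeWhile (· ≠ ',') :: List.splitOnP (· == ',') ((cs.dropWhile (· ≠ ',')).drop 1) := by
  induction cs with
  | nil => cases h
  | cons a t ih =>
    by_cases ha : a = ','
    · subst ha
      simp [List.splitOnP_cons]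
    · have ht : ',' ∈ t := by
        rcases List.mem_cons.1 h with e | m
        · exact absurd e.symm ha
        · exact m
      simp [List.splitOnP_cons, ha, ih ht]

-- B's selection of a parsed entry into one of the three output lists
def pvSel (s : List Char) (e : Option (List Char) × List String) : List String :=
  if e.1 = none ∨ e.1 = some s then e.2 else []

-- the scope-acceptance test seen by B, phrased on the remainder after the first comma
theorem pv_rem_iff (rem : List Char) :
    (1 < (List.splitOnP (· == ',') rem).length ∨ (List.splitOnP (· == ',') rem).getD 0 [] ≠ []) ↔ rem ≠ [] := by
  constructor
  · intro h hnil
    subst hnil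
    simp [List.splitOnP_nil] at h
  · intro hne
    by_cases hm : ',' ∈ rem
    · left
      rw [pv_sp_mem _ hm]
      have := List.splitOnP_ne_nil (· == ',') ((rem.dropWhile (· ≠ ',')).drop 1)
      have hpos : 0 < (List.splitOnP (· == ',') ((rem.dropWhile (· ≠ ',')).drop 1)).length :=
        List.length_pos_of_ne_nil this
      simp only [List.length_cons]
      omega
    · right
      rw [pv_sp_not_mem _ hm]
      simpa using hne

-- per-element agreement: A's loop step appends exactly B's per-entry contributions
theorem pv_stepA_eq (st : List String × List String × List String) (raw : String) :
    pvStepA st raw =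
      (st.1 ++ pvSel (['c','o','n','f','i','g']) (pvParseOne raw),
       st.2.1 ++ pvSel (['b','u','i','l','d']) (pvParseOne raw),
       st.2.2 ++ pvSel (['i','n','s','t','a','l','l']) (pvParseOne raw)) := by
  obtain ⟨c, b, i⟩ := st
  by_cases hmem : ',' ∈ PySem.Chars.strip raw.toList
  · -- text contains a comma
    have hin : PySem.Chars.isIn [','] (PySem.Chars.strip raw.toList) = true :=
      (PySem.Chars.isIn_iff_infix _ _).2 ((List.singleton_infix_iff _ _).2 hmem)
    have hsp : PySem.Chars.splitOn (PySem.Chars.strip raw.toList) [','] =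
        (PySem.Chars.strip raw.toList).takeWhile (· ≠ ',') ::
          List.splitOnP (· == ',')
            (((PySem.Chars.strip raw.toList).dropWhile (· ≠ ',')).drop 1) := by
      rw [pv_splitOn_comma, pv_sp_mem _ hmem]
    have hSne := List.splitOnP_ne_nil (· == ',')
        (((PySem.Chars.strip raw.toList).dropWhile (· ≠ ',')).drop 1)
    have hSpos : 0 < (List.splitOnP (· == ',')
        (((PySem.Chars.strip raw.toList).dropWhile (· ≠ ',')).drop 1)).length :=
      List.length_pos_of_ne_nil hSne
    have htne : PySem.Chars.strip raw.toList ≠ [] := fun h => by simp [h] at hmem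
    by_cases hacc : PySem.Chars.lower (PySem.Chars.strip
          ((PySem.Chars.strip raw.toList).takeWhile (· ≠ ','))) ∈ pvScopes ∧
        ((PySem.Chars.strip raw.toList).dropWhile (· ≠ ',')).drop 1 ≠ []
    · -- scope accepted by A; B's single-split test accepts too
      have hcond : 1 < (List.splitOnP (· == ',')
            (((PySem.Chars.strip raw.toList).dropWhile (· ≠ ',')).drop 1)).length ∨
          (List.splitOnP (· == ',')
            (((PySem.Chars.strip raw.toList).dropWhile (· ≠ ',')).drop 1)).getD 0 [] ≠ [] :=
        (pv_rem_iff _).2 hacc.2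
      have hB : pvParseOne raw =
          (some (PySem.Chars.lower (PySem.Chars.strip
              ((PySem.Chars.strip raw.toList).takeWhile (· ≠ ',')))),
            ((( List.splitOnP (· == ',')
                (((PySem.Chars.strip raw.toList).dropWhile (· ≠ ',')).drop 1)).map
                  PySem.Chars.strip).filter (fun p => p ≠ [])).map String.ofList) := by
        rw [pvParseOne]
        simp only [hsp]
        rw [if_pos (by simp only [List.length_cons]; omega)]
        simp only [List.headD_cons]
        rw [if_pos ⟨by simpa [pvScopes] using hacc.1,
              by
                simp only [List.getD_cons_succ, List.length_cons]
                exact Or.imp (fun h => by omega) id hcond⟩]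
        simp
      rw [pvStepA]
      simp only [if_neg htne, hin, if_true]
      rw [if_pos hacc]
      simp only [pv_splitOn_comma, hB, pvSel]
      have hc := hacc.1
      simp only [pvScopes, List.mem_cons, List.not_mem_nil, or_false] at hc
      rcases hc with hc1 | hc1 | hc1
      · rw [hc1]
        simp only [reduceCtorEq, Option.some.injEq, false_or]
        split_ifs with h1 h2 h3 h4 <;> simp_all
      · rw [hc1]
        simp only [reduceCtorEq, Option.some.injEq, false_or]
        split_ifs with h1 h2 h3 h4 <;> simp_all
      · rw [hc1]
        simp only [reduceCtorEq, Option.some.injEq, false_or]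
        split_ifs with h1 h2 h3 h4 <;> simp_all
    · -- scope rejected by A (bad prefix or empty remainder); B rejects too
      have hcond : ¬ (PySem.Chars.lower (PySem.Chars.strip
            ((PySem.Chars.strip raw.toList).takeWhile (· ≠ ','))) ∈ [['c','o','n','f','i','g'], ['b','u','i','l','d'], ['i','n','s','t','a','l','l']] ∧
          (1 < (List.splitOnP (· == ',')
            (((PySem.Chars.strip raw.toList).dropWhile (· ≠ ',')).drop 1)).length ∨
          (List.splitOnP (· == ',')
            (((PySem.Chars.strip raw.toList).dropWhile (· ≠ ',')).drop 1)).getD 0 [] ≠ [])) := by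
        intro ⟨h1, h2⟩
        exact hacc ⟨by simpa [pvScopes] using h1, (pv_rem_iff _).1 h2⟩
      have hB : pvParseOne raw =
          (none, ((((PySem.Chars.strip raw.toList).takeWhile (· ≠ ',') ::
              List.splitOnP (· == ',')
                (((PySem.Chars.strip raw.toList).dropWhile (· ≠ ',')).drop 1)).map
                  PySem.Chars.strip).filter (fun p => p ≠ [])).map String.ofList) := by
        rw [pvParseOne]
        simp only [hsp]
        rw [if_pos (by simp only [List.length_cons]; omega)]
        simp only [List.headD_cons]
        rw [if_neg (by
          intro ⟨h1, h2⟩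
          simp only [List.getD_cons_succ, List.length_cons] at h2
          exact hcond ⟨h1, Or.imp (fun h => by omega) id h2⟩)]
      rw [pvStepA]
      simp only [if_neg htne, hin, if_true]
      rw [if_neg hacc]
      simp only [hsp, hB, pvSel, reduceCtorEq, or_false]
      split_ifs with h1 <;> simp_all
  · -- no comma in text (includes the empty text that A skips)
    have hin : PySem.Chars.isIn [','] (PySem.Chars.strip raw.toList) = false := by
      rw [PySem.Chars.isIn_eq_false_iff]
      exact fun h => hmem ((List.singleton_infix_iff _ _).1 h)
    have hsp : PySem.Chars.splitOn (PySem.Chars.strip raw.toList) [','] =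
        [PySem.Chars.strip raw.toList] := by
      rw [pv_splitOn_comma, pv_sp_not_mem _ hmem]
    have hB : pvParseOne raw =
        (none, (([PySem.Chars.strip raw.toList].map PySem.Chars.strip).filter
            (fun p => p ≠ [])).map String.ofList) := by
      rw [pvParseOne]
      simp only [hsp]
      rw [if_neg (by simp)]
    rw [pvStepA]
    by_cases htnil : PySem.Chars.strip raw.toList = []
    · rw [if_pos htnil]
      have : pvParseOne raw = (none, []) := by
        rw [hB, htnil]
        rfl
      simp [this, pvSel]
    · rw [if_neg htnil]
      simp only [hin, Bool.false_eq_true, if_false, hsp]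
      simp only [hB, pvSel, reduceCtorEq, or_false]
      split_ifs with h1 <;> simp_all

-- pass 1 of B, characterized
theorem pv_scoped_eq : ∀ (values : List String) (acc : List (Option (List Char) × List String)),
    values.foldl (fun acc raw =>
      let e := pvParseOne raw
      if e.2 ≠ [] then acc ++ [e] else acc) acc
    = acc ++ (values.map pvParseOne).filter (fun e => e.2 ≠ []) := by
  intro values
  induction values with
  | nil => intro acc; simp
  | cons v vs ih =>
    intro acc
    rw [List.foldl_cons, ih]
    by_cases hv : (pvParseOne v).2 = []
    · simp [hv]
    · simp [hv]

-- pass 2 of B, fused into one flatMap per output list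
theorem pv_distrib (s : List Char) : ∀ (values : List String),
    (((values.map pvParseOne).filter (fun e => e.2 ≠ [])).filter
        (fun e => e.1 = none ∨ e.1 = some s)).flatMap (fun e => e.2)
      = values.flatMap (fun r => pvSel s (pvParseOne r)) := by
  intro values
  induction values with
  | nil => simp
  | cons v vs ih =>
    rw [List.map_cons, List.filter_cons]
    by_cases hv : (pvParseOne v).2 = []
    · rw [if_neg (by simp [hv]), ih, List.flatMap_cons]
      simp [pvSel, hv]
    · rw [if_pos (by simp [hv]), List.filter_cons]
      by_cases hs : (pvParseOne v).1 = none ∨ (pvParseOne v).1 = some s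
      · rw [if_pos (by simp [hs]), List.flatMap_cons, ih, List.flatMap_cons]
        simp [pvSel, hs]
      · rw [if_neg (by simp [hs]), ih, List.flatMap_cons]
        simp [pvSel, hs]

theorem pv_alt_eq (values : List String) :
    parse_extra_switches_py_alt values =
      (values.flatMap (fun r => pvSel (['c','o','n','f','i','g']) (pvParseOne r)),
       values.flatMap (fun r => pvSel (['b','u','i','l','d']) (pvParseOne r)),
       values.flatMap (fun r => pvSel (['i','n','s','t','a','l','l']) (pvParseOne r))) := by
  unfold parse_extra_switches_py_alt
  rw [pv_scoped_eq, List.nil_append]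
  simp only [pv_distrib]

theorem pv_foldA_eq : ∀ (values : List String) (c b i : List String),
    values.foldl pvStepA (c, b, i)
      = (c ++ values.flatMap (fun r => pvSel (['c','o','n','f','i','g']) (pvParseOne r)),
         b ++ values.flatMap (fun r => pvSel (['b','u','i','l','d']) (pvParseOne r)),
         i ++ values.flatMap (fun r => pvSel (['i','n','s','t','a','l','l']) (pvParseOne r))) := by
  intro values
  induction values with
  | nil => intro c b i; simp
  | cons v vs ih =>
    intro c b i
    simp only [List.foldl_cons, List.flatMap_cons]
    rw [pv_stepA_eq (c, b, i) v]
    rw [ih]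
    simp [List.append_assoc]

-- ===== VERDICT (by name: the statement is the Claim_ definition above) =====
theorem parse_extra_switches_py_spec : Claim_equal_parse_extra_switches_py := by
  intro values _
  show parse_extra_switches_py values = parse_extra_switches_py_alt values
  rw [parse_extra_switches_py, pv_foldA_eq values [] [] [], pv_alt_eq]
  simp
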